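-- pv_equiv track=rewrite | github.com/racalcity-maker/prophet_sphere | kws/scripts/normalize_text_bank_pairs.py | join_in_pairs
-- ===== SOURCE A (Python) =====
-- from typing import Iterable, List
--
-- def join_in_pairs(sentences: Iterable[str]) -> List[str]:
--     items = list(sentences)
--     out: List[str] = []
--     i = 0
--     while i < len(items):
--         if i + 1 < len(items):
--             out.append(f"{items[i]} {items[i + 1]}")
--             i += 2
--         else:
--             out.append(items[i])
--             i += 1
--     return out
-- ===== SOURCE B (Python) =====
-- from typing import Iterable, List
--
-- def join_in_pairs(sentences: Iterable[str]) -> List[str]: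
--     items = list(sentences)
--     evens = items[0::2]
--     odds = items[1::2]
--     out = [f"{a} {b}" for a, b in zip(evens, odds)]
--     if len(evens) > len(odds):
--         out.append(evens[-1])
--     return out
-- ===== Notes on version B (the rewrite author's own statement) =====
-- stated objective: simpler
-- what changed: Replaces the index-stepping while loop and its odd-tail branch with two strided slices zipped by a comprehension (the C-level slice/zip machinery replaces per-element Python indexing), appending the last even-slice element when the length is odd.
import Mathlib
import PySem

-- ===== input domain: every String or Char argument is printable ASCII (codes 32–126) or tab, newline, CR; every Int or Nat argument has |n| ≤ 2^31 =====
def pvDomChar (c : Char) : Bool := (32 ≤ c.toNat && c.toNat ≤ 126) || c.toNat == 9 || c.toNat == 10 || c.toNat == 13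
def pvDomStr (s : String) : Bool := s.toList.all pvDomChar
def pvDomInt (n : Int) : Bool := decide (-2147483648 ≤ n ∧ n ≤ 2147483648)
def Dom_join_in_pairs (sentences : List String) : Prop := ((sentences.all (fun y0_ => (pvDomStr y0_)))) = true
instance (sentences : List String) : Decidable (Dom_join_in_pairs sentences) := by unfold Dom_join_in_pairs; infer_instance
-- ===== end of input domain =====

-- B replaces A's index-stepping while loop and odd-tail branch with two stride-2 slices joined
-- by a zip comprehension (objective: simpler decomposition; same return value).

-- ===== PORT A =====
-- the while loop of A, as recursion over the index i (out.append becomes cons)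
def joinInPairsGo (items : List String) (i : Nat) : List String :=
  if _h : i < items.length then
    if i + 1 < items.length then
      ((PySem.List.pyGet? items (i : Int)).getD "" ++ " " ++
        (PySem.List.pyGet? items ((i : Int) + 1)).getD "") :: joinInPairsGo items (i + 2)
    else
      [(PySem.List.pyGet? items (i : Int)).getD ""]
  else []
termination_by items.length - i

def join_in_pairs (sentences : List String) : List String :=
  joinInPairsGo sentences 0

-- ===== PORT B =====
-- items[k::2]: a stride-2 slice, ported by hand (exact for step 2 with nonnegative start:
-- take the head, then recurse after dropping one element)
def pvStride2 {α : Type} : List α → List α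
  | [] => []
  | [x] => [x]
  | x :: _ :: xs => x :: pvStride2 xs

def join_in_pairs_alt (sentences : List String) : List String :=
  let evens := pvStride2 sentences                 -- items[0::2]
  let odds := pvStride2 (sentences.drop 1)         -- items[1::2]
  let out := (evens.zip odds).map (fun p => p.1 ++ " " ++ p.2)
  if odds.length < evens.length then
    out ++ [(PySem.List.pyGet? evens (-1)).getD ""]   -- evens[-1]
  else out

-- ===== PRECONDITION & SPEC =====
def Spec_join_in_pairs (sentences : List String) (out : List String) : Prop := out = join_in_pairs_alt sentences
instance (sentences : List String) (out : List String) : Decidable (Spec_join_in_pairs sentences out) := by unfold Spec_join_in_pairs; infer_instance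

-- ===== CLAIM (what is proved, stated in full; the proofs are below) =====
def Claim_equal_join_in_pairs : Prop := ∀ (sentences : List String), Dom_join_in_pairs sentences → Spec_join_in_pairs sentences (join_in_pairs sentences)

-- ===== LEMMAS AND PROOFS =====

-- common characterisation: pair up consecutive elements
def pairChunks : List String → List String
  | [] => []
  | [a] => [a]
  | a :: b :: rest => (a ++ " " ++ b) :: pairChunks rest

theorem joinGo_eq_pairChunks (items : List String) (i : Nat) :
    joinInPairsGo items i = pairChunks (items.drop i) := by
  fun_induction joinInPairsGo items i with
  | case1 i h h2 ih =>
      rw [List.drop_eq_getElem_cons h, List.drop_eq_getElem_cons h2]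
      have g1 : PySem.List.pyGet? items (i : Int) = some items[i] :=
        PySem.List.pyGet?_ofNat (xs := items) (n := i) h
      have g2 : PySem.List.pyGet? items ((i : Int) + 1) = some items[i + 1] := by
        have := PySem.List.pyGet?_ofNat (xs := items) (n := i + 1) h2
        simpa using this
      simp [pairChunks, g1, g2, ih]
  | case2 i h h2 =>
      have hi : i + 1 = items.length := by omega
      rw [List.drop_eq_getElem_cons h]
      have : items.drop (i + 1) = [] := by simp [hi]
      have g1 : PySem.List.pyGet? items (i : Int) = some items[i] :=
        PySem.List.pyGet?_ofNat (xs := items) (n := i) h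
      simp [this, pairChunks, g1]
  | case3 i h =>
      have : items.drop i = [] := by
        simp; omega
      simp [this, pairChunks]

theorem stride2_cons_drop {α : Type} (x : α) (xs : List α) :
    pvStride2 (x :: xs) = x :: pvStride2 xs.tail := by
  cases xs <;> simp [pvStride2]

theorem alt_cons_cons (a b : String) (rest : List String) :
    join_in_pairs_alt (a :: b :: rest) = (a ++ " " ++ b) :: join_in_pairs_alt rest := by
  have h1 : pvStride2 (a :: b :: rest) = a :: pvStride2 rest := by simp [pvStride2]
  have h2 : pvStride2 (b :: rest) = b :: pvStride2 rest.tail := stride2_cons_drop b rest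
  simp only [join_in_pairs_alt, List.drop_one, List.tail_cons, h1, h2, List.zip_cons_cons,
    List.map_cons, List.length_cons]
  rcases hE : pvStride2 rest with _ | ⟨e, E⟩
  · simp
  · by_cases hc : (pvStride2 rest.tail).length < (e :: E).length
    · rw [if_pos (by simpa using hc), if_pos hc]
      simp [PySem.List.pyGet?_neg_one]
    · rw [if_neg (by simpa using hc), if_neg hc]

theorem alt_eq_pairChunks (s : List String) :
    join_in_pairs_alt s = pairChunks s := by
  fun_induction pairChunks s with
  | case1 => simp [join_in_pairs_alt, pvStride2]
  | case2 a =>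
      simp [join_in_pairs_alt, pvStride2, PySem.List.pyGet?_neg_one]
  | case3 a b rest ih =>
      rw [alt_cons_cons, ih]

-- ===== VERDICT (by name: the statement is the Claim_ definition above) =====
theorem join_in_pairs_spec : Claim_equal_join_in_pairs := by
  intro s _
  show join_in_pairs s = join_in_pairs_alt s
  rw [join_in_pairs, joinGo_eq_pairChunks, List.drop_zero, alt_eq_pairChunks]
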